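-- pv_equiv track=rewrite | github.com/tberhanu/elts-of-coding | HashTables/find_all_substrings.py | find_all_substrings
-- ===== SOURCE A (Python) =====
-- def find_all_substrings(words, sentence):
--     """
--     Taking a SENTENCE and a list of WORDS, find the substring of the sentence which are the concatenation of all
--     the words in ANY ORDER.
--     Input:
--         words = ["can", "apl", "ana"]
--         sentence = "amanaplanacanal"
--     Output: index: 4 as the substring is "aplanacan"
--
--     Input:
--         words = ["can", "apl", "ana"]
--         sentence = "amanaplanacaanaaplcanl"
--     Output: index: 12 as the substring is "anaaplcan"
--
--     Tess Strategy: First get the length of all the concatenated words, and only compare a slice from the sentence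
--                    with the same length: O(N * W) where N is len(sentence), and W len(words).
--     """
--     words_str = "".join(words)
--     length = len(words_str)
--     i = 0
--     while i + length < len(sentence):
--         substring = sentence[i: i + length]
--         if is_words_in_substring(words, substring):
--             return i, substring
--         i += 1
--     return -1, "Not found"
--
-- def is_words_in_substring(words, substring):
--     for word in words:
--         if word not in substring:
--             return False
--     return True
-- ===== SOURCE B (Python) =====
-- def bisect_left(a, x):
--     lo, hi = 0, len(a)
--     while lo < hi:
--         mid = (lo + hi) // 2
--         if a[mid] < x:
--             lo = mid + 1
--         else:
--             hi = mid
--     return lo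
--
-- def find_all_substrings(words, sentence):
--     n = len(sentence)
--     total = sum(len(w) for w in words)
--     if total > n:
--         return -1, "Not found"
--     occ = []
--     for w in words:
--         ps = []
--         j = sentence.find(w)
--         while j != -1:
--             ps.append(j)
--             j = sentence.find(w, j + 1)
--         occ.append((len(w), ps))
--     for i in range(n - total + 1):
--         ok = True
--         for wl, ps in occ:
--             j = bisect_left(ps, i)
--             if j == len(ps) or ps[j] + wl > i + total:
--                 ok = False
--                 break
--         if ok:
--             return i, sentence[i:i + total]
--     return -1, "Not found"
-- ===== Notes on version B (the rewrite author's own statement) =====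
-- stated objective: alternative
-- what changed: Instead of re-scanning every length-L window for every word, B precomputes each word's sorted occurrence positions in the sentence once (via str.find) and answers each window with a hand-written binary search per word; B also checks the last window (i + L == len(sentence)), which A's off-by-one loop bound skips.
-- intended difference: On inputs whose only matching window is the final one (i + L == len(sentence)), A's loop bound 'i + length < len(sentence)' skips that window and A returns (-1, 'Not found'), while B returns that last index and window, which is intended since a window ending exactly at the end of the sentence is a valid substring. — e.g. on find_all_substrings(["ab"], "ab"): A returns (-1, "Not found"), B returns (0, "ab")
import Mathlib
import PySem

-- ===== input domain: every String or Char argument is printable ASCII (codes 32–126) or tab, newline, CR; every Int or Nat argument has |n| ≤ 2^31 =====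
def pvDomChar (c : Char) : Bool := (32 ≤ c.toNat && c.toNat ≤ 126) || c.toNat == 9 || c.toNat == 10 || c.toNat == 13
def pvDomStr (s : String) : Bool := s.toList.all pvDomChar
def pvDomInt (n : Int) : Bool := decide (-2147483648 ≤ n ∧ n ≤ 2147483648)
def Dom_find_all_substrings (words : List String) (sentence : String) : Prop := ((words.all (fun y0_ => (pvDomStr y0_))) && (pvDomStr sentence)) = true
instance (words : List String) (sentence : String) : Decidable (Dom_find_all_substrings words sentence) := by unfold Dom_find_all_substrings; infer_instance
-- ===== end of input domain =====

-- B replaces A's per-window substring scans by precomputed sorted occurrence lists plus a binary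
-- search per word per window, and also examines the final window (i + L = len(sentence)) which
-- A's loop bound 'i + length < len(sentence)' skips (stated as the intended difference D_ below).

-- ===== PORT A =====
def is_words_in_substring (words : List String) (substring : String) : Bool :=
  match words with
  | [] => true
  | word :: rest =>
      if PySem.Str.isIn word substring = false then false
      else is_words_in_substring rest substring

-- 'while i + length < len(sentence)' loop of A; i, length, len(sentence) are nonnegative, kept as
-- Nat; fuel ≥ n - i makes the recursion structural and is never exhausted while the guard holds
def findAllLoopA (words : List String) (sentence : String) (L n : Nat) : Nat → Nat → Int × String
  | 0, _ => (-1, "Not found")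
  | fuel + 1, i =>
    if i + L < n then
      let substring := PySem.Str.slice sentence (some (i : Int)) (some ((i : Int) + (L : Int)))
      if is_words_in_substring words substring then ((i : Int), substring)
      else findAllLoopA words sentence L n fuel (i + 1)
    else (-1, "Not found")

def find_all_substrings (words : List String) (sentence : String) : Int × String :=
  let words_str := PySem.Str.join "" words
  let length := words_str.toList.length
  findAllLoopA words sentence length sentence.toList.length sentence.toList.length 0

-- ===== PORT B =====
-- hand-written bisect_left of Source B (lo, hi are nonnegative, kept as Nat; a[mid] is in range at
-- every call, getD's default is never read)
-- fuel ≥ hi - lo makes the 'while lo < hi' recursion structural and is never exhausted;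
-- mid = (lo + hi) // 2 is inlined (lo, hi ≥ 0, so Nat '/' is Python's '//' here)
def bisectLoop (a : List Int) (x : Int) : Nat → Nat → Nat → Nat
  | 0, lo, _ => lo
  | fuel + 1, lo, hi =>
    if lo < hi then
      if a.getD ((lo + hi) / 2) 0 < x then bisectLoop a x fuel ((lo + hi) / 2 + 1) hi
      else bisectLoop a x fuel lo ((lo + hi) / 2)
    else lo

def bisect_left (a : List Int) (x : Int) : Nat := bisectLoop a x a.length 0 a.length

-- 'j = sentence.find(w); while j != -1: ps.append(j); j = sentence.find(w, j + 1)';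
-- fuel ≥ len(s) + 1 makes the recursion structural and is never exhausted (j grows each step)
def posLoop (s w : List Char) : Nat → Int → List Int → List Int
  | 0, _, acc => acc
  | fuel + 1, j, acc =>
    if j ≠ -1 then posLoop s w fuel (PySem.Chars.findFrom s w (j + 1) none) (acc ++ [j])
    else acc

def posList (s w : List Char) : List Int :=
  posLoop s w (s.length + 1) (PySem.Chars.find s w) []

-- inner 'for wl, ps in occ' loop with ok/break
def checkB (total : Int) (occ : List (Int × List Int)) (i : Int) : Bool :=
  occ.all (fun wp =>
    let j := bisect_left wp.2 i
    !(j == wp.2.length || decide (wp.2.getD j 0 + wp.1 > i + total)))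

def find_all_substrings_alt (words : List String) (sentence : String) : Int × String :=
  let n : Int := (sentence.toList.length : Int)
  let total : Int := (words.map (fun w => ((w.toList.length : Nat) : Int))).sum
  if total > n then (-1, "Not found")
  else
    let occ : List (Int × List Int) :=
      words.map (fun w => (((w.toList.length : Nat) : Int), posList sentence.toList w.toList))
    match (PySem.List.pyRange 0 (n - total + 1)).find? (checkB total occ) with
    | some i => (i, PySem.Str.slice sentence (some i) (some (i + total)))
    | none => (-1, "Not found")

-- ===== PRECONDITION & SPEC =====
-- On inputs whose ONLY matching window is the final one (starting at len(sentence) - L), A's loop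
-- bound 'i + length < len(sentence)' skips it and A returns (-1, "Not found"), while B returns that
-- last index and window; B's value is intended, a window ending at the end of the sentence is valid.
def D_find_all_substrings (words : List String) (sentence : String) : Prop :=
  let s := sentence.toList
  let L := (words.map (fun w => w.toList.length)).sum
  L ≤ s.length ∧
  ∀ i ≤ s.length - L, ((∀ w ∈ words, w.toList <:+: (s.drop i).take L) ↔ i = s.length - L)
instance (words : List String) (sentence : String) : Decidable (D_find_all_substrings words sentence) := by
  unfold D_find_all_substrings; infer_instance

def Spec_find_all_substrings (words : List String) (sentence : String) (out : Int × String) : Prop :=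
  ¬ D_find_all_substrings words sentence → out = find_all_substrings_alt words sentence
instance (words : List String) (sentence : String) (out : Int × String) : Decidable (Spec_find_all_substrings words sentence out) := by
  unfold Spec_find_all_substrings; infer_instance

def pvDiffWitness_find_all_substrings : List String × String := (["ab"], "ab")
def pvDiffWitnessOut_find_all_substrings : (Int × String) × (Int × String) :=
  ((-1, "Not found"), (0, "ab"))

-- ===== CLAIM (what is proved, stated in full; the proofs are below) =====
def Claim_unchanged_find_all_substrings : Prop := ∀ (words : List String) (sentence : String), Dom_find_all_substrings words sentence → Spec_find_all_substrings words sentence (find_all_substrings words sentence)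
def Claim_changed_find_all_substrings : Prop := Dom_find_all_substrings (pvDiffWitness_find_all_substrings.1) (pvDiffWitness_find_all_substrings.2) ∧ D_find_all_substrings (pvDiffWitness_find_all_substrings.1) (pvDiffWitness_find_all_substrings.2) ∧ find_all_substrings (pvDiffWitness_find_all_substrings.1) (pvDiffWitness_find_all_substrings.2) = pvDiffWitnessOut_find_all_substrings.1 ∧ find_all_substrings_alt (pvDiffWitness_find_all_substrings.1) (pvDiffWitness_find_all_substrings.2) = pvDiffWitnessOut_find_all_substrings.2 ∧ pvDiffWitnessOut_find_all_substrings.1 ≠ pvDiffWitnessOut_find_all_substrings.2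
def Claim_exact_find_all_substrings : Prop := ∀ (words : List String) (sentence : String), Dom_find_all_substrings words sentence → D_find_all_substrings words sentence → find_all_substrings words sentence ≠ find_all_substrings_alt words sentence

-- ===== LEMMAS AND PROOFS =====

-- the per-window predicate both loops evaluate, and the scan both loops perform
def chkP (words : List String) (sentence : String) (L : Nat) (j : Nat) : Bool :=
  is_words_in_substring words
    (PySem.Str.slice sentence (some (j : Int)) (some ((j : Int) + (L : Int))))

def scanRes (words : List String) (sentence : String) (L : Nat) (l : List Nat) : Int × String :=
  match l.find? (chkP words sentence L) with
  | some j => ((j : Int), PySem.Str.slice sentence (some (j : Int)) (some ((j : Int) + (L : Int))))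
  | none => (-1, "Not found")

lemma intercalate_nil_flatten (lss : List (List Char)) :
    (List.intersperse ([] : List Char) lss).flatten = lss.flatten := by
  induction lss with
  | nil => rfl
  | cons h t ih => cases t <;> simp_all [List.intersperse]

lemma join_len (words : List String) :
    (PySem.Str.join "" words).toList.length = (words.map (fun w => w.toList.length)).sum := by
  simp [PySem.Str.toList_join, PySem.Chars.join, List.intercalate, intercalate_nil_flatten,
    Function.comp_def]

lemma isw_iff (words : List String) (sub : String) :
    is_words_in_substring words sub = true ↔ ∀ w ∈ words, w.toList <:+: sub.toList := by
  induction words with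
  | nil => simp [is_words_in_substring]
  | cons w ws ih =>
    have hw : (PySem.Str.isIn w sub = true) ↔ w.toList <:+: sub.toList :=
      PySem.Str.isIn_iff_infix w sub
    cases hb : PySem.Str.isIn w sub with
    | false =>
      rw [is_words_in_substring, if_pos (by rw [hb])]
      constructor
      · intro hh; cases hh
      · intro hh; exfalso
        have h2 := hh w (List.mem_cons_self)
        rw [← hw, hb] at h2; cases h2
    | true =>
      rw [is_words_in_substring, if_neg (by rw [hb]; simp), ih]
      constructor
      · intro hh x hx
        rcases List.mem_cons.mp hx with rfl | hx2
        · exact hw.mp hb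
        · exact hh x hx2
      · intro hh x hx; exact hh x (List.mem_cons_of_mem _ hx)

lemma slice_window (sentence : String) (L i : Nat) :
    (PySem.Str.slice sentence (some (i : Int)) (some ((i : Int) + (L : Int)))).toList
      = (sentence.toList.drop i).take L := by
  rw [PySem.Str.toList_slice, PySem.Chars.slice_eq_listSlice]
  rw [show ((i : Int) + (L : Int)) = (((i + L : Nat)) : Int) by push_cast; ring]
  rw [PySem.List.slice_natCast]
  congr 1; omega

lemma chkP_iff (words : List String) (sentence : String) (L i : Nat) :
    chkP words sentence L i = true ↔
      ∀ w ∈ words, w.toList <:+: (sentence.toList.drop i).take L := by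
  rw [chkP, isw_iff, ← slice_window sentence L i]

lemma loopA_scan (words : List String) (sentence : String) (L n : Nat) :
    ∀ fuel i : Nat, n ≤ fuel + i →
      findAllLoopA words sentence L n fuel i = scanRes words sentence L (List.range' i (n - L - i)) := by
  intro fuel
  induction fuel with
  | zero =>
    intro i hi
    have h0 : n - L - i = 0 := by omega
    rw [h0]
    simp [findAllLoopA, scanRes]
  | succ fuel ih =>
    intro i hi
    by_cases hg : i + L < n
    · have hm : n - L - i = (n - L - (i + 1)) + 1 := by omega
      rw [findAllLoopA, if_pos hg, hm, List.range'_succ]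
      cases hc : chkP words sentence L i with
      | true =>
        rw [scanRes, List.find?_cons_of_pos (h := hc)]
        have hh : is_words_in_substring words
            (PySem.Str.slice sentence (some (i : Int)) (some ((i : Int) + (L : Int)))) = true := hc
        simp only [hh, if_true]
      | false =>
        rw [scanRes, List.find?_cons_of_neg (h := by rw [hc]; simp), ih (i + 1) (by omega), scanRes]
        have hfalse : is_words_in_substring words
            (PySem.Str.slice sentence (some (i : Int)) (some ((i : Int) + (L : Int)))) = false := hc
        simp only [hfalse, Bool.false_eq_true, if_false]
    · have h0 : n - L - i = 0 := by omega
      rw [h0, findAllLoopA, if_neg hg]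
      simp [scanRes]

lemma bisectLoop_spec (a : List Int) (x : Int) (hs : a.Pairwise (· ≤ ·)) :
    ∀ fuel lo hi, hi - lo ≤ fuel → hi ≤ a.length →
      (∀ k, k < lo → ∀ h : k < a.length, a[k] < x) →
      (∀ k, hi ≤ k → ∀ h : k < a.length, x ≤ a[k]) →
      lo ≤ hi →
      bisectLoop a x fuel lo hi ≤ a.length ∧
      (∀ k, k < bisectLoop a x fuel lo hi → ∀ h : k < a.length, a[k] < x) ∧
      (∀ k, bisectLoop a x fuel lo hi ≤ k → ∀ h : k < a.length, x ≤ a[k]) := by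
  have hmono : ∀ (i j : Nat) (hi : i < a.length) (hj : j < a.length), i ≤ j → a[i] ≤ a[j] := by
    intro i j hi hj hij
    rcases Nat.lt_or_ge i j with h | h
    · exact List.pairwise_iff_getElem.mp hs i j hi hj h
    · have h2 : i = j := by omega
      subst h2; rfl
  intro fuel
  induction fuel with
  | zero =>
    intro lo hi hf hlen hlo hhi hle
    have h2 : lo = hi := by omega
    subst h2
    simp only [bisectLoop]
    exact ⟨hlen, hlo, hhi⟩
  | succ fuel ih =>
    intro lo hi hf hlen hlo hhi hle
    rw [bisectLoop]
    by_cases hg : lo < hi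
    · rw [if_pos hg]
      have hmid : (lo + hi) / 2 < hi := by omega
      have hmidlo : lo ≤ (lo + hi) / 2 := by omega
      have hmlen : (lo + hi) / 2 < a.length := by omega
      rw [List.getD_eq_getElem a 0 hmlen]
      by_cases hc : a[(lo + hi) / 2] < x
      · rw [if_pos hc]
        exact ih ((lo + hi) / 2 + 1) hi (by omega) hlen
          (by intro k hk h; exact lt_of_le_of_lt (hmono k ((lo + hi) / 2) h hmlen (by omega)) hc)
          hhi (by omega)
      · rw [if_neg hc]
        exact ih lo ((lo + hi) / 2) (by omega) (by omega) hlo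
          (by intro k hk h; exact le_trans (le_of_not_gt hc) (hmono ((lo + hi) / 2) k hmlen h hk))
          (by omega)
    · rw [if_neg hg]
      have h2 : lo = hi := by omega
      subst h2
      exact ⟨hlen, hlo, hhi⟩

lemma bisect_spec (a : List Int) (x : Int) (hs : a.Pairwise (· ≤ ·)) :
    bisect_left a x ≤ a.length ∧
    (∀ k, k < bisect_left a x → ∀ h : k < a.length, a[k] < x) ∧
    (∀ k, bisect_left a x ≤ k → ∀ h : k < a.length, x ≤ a[k]) := by
  exact bisectLoop_spec a x hs a.length 0 a.length (by omega) (le_refl _)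
    (by intro k hk h; omega) (by intro k hk h; omega) (by omega)

-- the occurrences of w in s at positions ≥ k (proof-side characterisation of posLoop)
def occs (s w : List Char) (k : Nat) : List Int :=
  ((List.range' k (s.length + 1 - w.length - k)).filter (fun q => decide (w <+: s.drop q))).map
    (fun q => ((q : Nat) : Int))

lemma findFrom_past (s w : List Char) (k : Nat) (h : s.length < k) :
    PySem.Chars.findFrom s w (k : Int) none = -1 := by
  rw [PySem.Chars.findFrom]
  rw [if_pos (by omega)]

lemma findFrom_le (s w : List Char) (k : Nat) (hk : k ≤ s.length) :
    PySem.Chars.findFrom s w (k : Int) none ≤ s.length := by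
  rw [PySem.Chars.findFrom_natCast s w k hk]
  have h1 := PySem.Chars.find_le_length (s.drop k) w
  rw [List.length_drop] at h1
  split_ifs with h
  · omega
  · omega

lemma occs_split (s w : List Char) (k q : Nat) (hk : k ≤ q) (hq : q + w.length ≤ s.length)
    (hpre : w <+: s.drop q) (hmin : ∀ r, k ≤ r → r < q → ¬ w <+: s.drop r) :
    occs s w k = ((q : Nat) : Int) :: occs s w (q + 1) := by
  rw [occs, occs]
  have hsplit : List.range' k (s.length + 1 - w.length - k)
      = List.range' k (q - k) ++ List.range' q (s.length + 1 - w.length - q) := by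
    rw [show (List.range' q (s.length + 1 - w.length - q) : List Nat)
        = List.range' (k + 1 * (q - k)) (s.length + 1 - w.length - q) by congr 1; omega,
      List.range'_append]
    congr 1; omega
  rw [hsplit, List.filter_append]
  have hnil : (List.range' k (q - k)).filter (fun r => decide (w <+: s.drop r)) = [] := by
    rw [List.filter_eq_nil_iff]
    intro r hr
    rw [List.mem_range'_1] at hr
    simpa using hmin r (by omega) (by omega)
  rw [hnil, List.nil_append,
    show s.length + 1 - w.length - q = (s.length + 1 - w.length - (q + 1)) + 1 by omega,
    List.range'_succ, List.filter_cons_of_pos (by simpa using hpre), List.map_cons]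

lemma occs_nil_of_none (s w : List Char) (k : Nat)
    (hnone : ¬ w <:+: s.drop k) : occs s w k = [] := by
  rw [occs]
  have hnil : (List.range' k (s.length + 1 - w.length - k)).filter
      (fun q => decide (w <+: s.drop q)) = [] := by
    rw [List.filter_eq_nil_iff]
    intro r hr
    rw [List.mem_range'_1] at hr
    simp only [decide_eq_true_eq]
    intro hpre
    apply hnone
    have hdr : s.drop r = List.drop (r - k) (s.drop k) := by
      rw [List.drop_drop]; congr 1; omega
    rw [hdr] at hpre
    exact hpre.isInfix.trans (List.drop_suffix _ _).isInfix
  rw [hnil]; rfl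

lemma posLoop_eq (s w : List Char) :
    ∀ fuel k acc, k ≤ s.length + 1 → s.length + 1 - k ≤ fuel →
      posLoop s w fuel (PySem.Chars.findFrom s w (k : Int) none) acc = acc ++ occs s w k := by
  intro fuel
  induction fuel with
  | zero =>
    intro k acc hk hfuel
    have hkn : k = s.length + 1 := by omega
    subst hkn
    rw [findFrom_past s w _ (by omega), posLoop,
      occs, show s.length + 1 - w.length - (s.length + 1) = 0 by omega]
    simp
  | succ fuel ih =>
    intro k acc hk hfuel
    rcases Nat.lt_or_ge s.length k with hkn | hkn
    · have hkn2 : k = s.length + 1 := by omega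
      subst hkn2
      rw [findFrom_past s w _ (by omega), posLoop, if_neg (by simp)]
      rw [occs, show s.length + 1 - w.length - (s.length + 1) = 0 by omega]
      simp
    · by_cases hj : PySem.Chars.findFrom s w (k : Int) none = -1
      · rw [hj, posLoop, if_neg (by simp)]
        rw [occs_nil_of_none s w k
          ((PySem.Chars.findFrom_natCast_eq_neg_one_iff s w k hkn).mp hj)]
        simp
      · obtain ⟨hge, hpre, hmin⟩ := PySem.Chars.findFrom_natCast_spec s w k hkn hj
        have hle := findFrom_le s w k hkn
        have hq : PySem.Chars.findFrom s w (k : Int) none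
            = (((PySem.Chars.findFrom s w (k : Int) none).toNat : Nat) : Int) := by omega
        set q := (PySem.Chars.findFrom s w (k : Int) none).toNat with hqdef
        have hqn : q ≤ s.length := by omega
        have hwl : q + w.length ≤ s.length := by
          have h2 := hpre.length_le
          rw [List.length_drop] at h2
          omega
        have hkq : k ≤ q := by omega
        have hj1 : PySem.Chars.findFrom s w (k : Int) none + 1 = (((q + 1 : Nat)) : Int) := by
          push_cast; omega
        rw [posLoop, if_pos hj, hj1, ih (q + 1) (acc ++ [PySem.Chars.findFrom s w (k : Int) none])
            (by omega) (by omega),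
          occs_split s w k q hkq hwl hpre hmin, hq]
        simp [List.append_assoc]

lemma posList_eq_occs (s w : List Char) : posList s w = occs s w 0 := by
  rw [posList, ← PySem.Chars.findFrom_zero s w,
    show (0 : Int) = ((0 : Nat) : Int) by rfl,
    posLoop_eq s w (s.length + 1) 0 [] (by omega) (by omega)]
  rfl

lemma mem_posList (s w : List Char) (p : Int) :
    p ∈ posList s w ↔ ∃ q : Nat, p = (q : Int) ∧ q + w.length ≤ s.length ∧ w <+: s.drop q := by
  rw [posList_eq_occs, occs, List.mem_map]
  constructor
  · rintro ⟨q, hq, rfl⟩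
    rw [List.mem_filter, List.mem_range'_1, decide_eq_true_eq] at hq
    exact ⟨q, rfl, by omega, hq.2⟩
  · rintro ⟨q, rfl, hqb, hpre⟩
    refine ⟨q, ?_, rfl⟩
    rw [List.mem_filter, List.mem_range'_1, decide_eq_true_eq]
    exact ⟨⟨by omega, by omega⟩, hpre⟩

lemma sorted_posList (s w : List Char) : (posList s w).Pairwise (· ≤ ·) := by
  rw [posList_eq_occs, occs]
  rw [List.pairwise_map]
  have h1 : (List.range' 0 (s.length + 1 - w.length) 1).Pairwise (· < ·) :=
    List.pairwise_lt_range'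
  exact ((h1.sublist List.filter_sublist).imp
    (by intro a b h; exact_mod_cast le_of_lt h))

lemma find?_congr_mem {p q : Nat → Bool} (l : List Nat) (h : ∀ a ∈ l, p a = q a) :
    l.find? p = l.find? q := by
  induction l with
  | nil => rfl
  | cons a t ih =>
    rw [List.find?_cons, List.find?_cons, h a List.mem_cons_self,
      ih (fun b hb => h b (List.mem_cons_of_mem a hb))]

-- exists-occurrence ↔ word is an infix of the window
lemma exists_occ_iff (s w : List Char) (L i : Nat) (h1 : i + L ≤ s.length) :
    (∃ p ∈ posList s w, (i : Int) ≤ p ∧ p + (w.length : Int) ≤ (i : Int) + (L : Int))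
      ↔ w <:+: (s.drop i).take L := by
  constructor
  · rintro ⟨p, hp, hip, hpl⟩
    rw [mem_posList] at hp
    obtain ⟨q, rfl, hqn, hpre⟩ := hp
    have hiq : i ≤ q := by exact_mod_cast hip
    have hql : q + w.length ≤ i + L := by exact_mod_cast hpl
    have hdrop : List.drop (q - i) ((s.drop i).take L)
        = List.take (L - (q - i)) (s.drop q) := by
      rw [List.drop_take, List.drop_drop, show i + (q - i) = q by omega]
    have hpref : w <+: List.drop (q - i) ((s.drop i).take L) := by
      rw [hdrop, List.prefix_take_iff]
      exact ⟨hpre, by omega⟩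
    exact hpref.isInfix.trans (List.drop_suffix _ _).isInfix
  · rintro ⟨t, u, hw⟩
    have htl : t.length + w.length + u.length = ((s.drop i).take L).length := by
      rw [← hw]; simp [Nat.add_assoc]
    have hwin : ((s.drop i).take L).length = L := by
      simp; omega
    refine ⟨((i + t.length : Nat) : Int), ?_, by exact_mod_cast Nat.le_add_right i t.length, ?_⟩
    · rw [mem_posList]
      refine ⟨i + t.length, rfl, by omega, ?_⟩
      have h2 : List.drop t.length ((s.drop i).take L) = w ++ u := by
        rw [← hw, List.append_assoc, List.drop_left]
      rw [List.drop_take, List.drop_drop] at h2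
      have h3 : w <+: List.take (L - t.length) (s.drop (i + t.length)) := ⟨u, h2.symm⟩
      exact (List.prefix_take_iff.mp h3).1
    · push_cast; omega

-- the per-word bisect condition ↔ some occurrence lies in [x, c - wl]
lemma bisect_cond_iff (ps : List Int) (hs : ps.Pairwise (· ≤ ·)) (x wl c : Int) :
    (bisect_left ps x ≠ ps.length ∧ ps.getD (bisect_left ps x) 0 + wl ≤ c)
      ↔ ∃ p ∈ ps, x ≤ p ∧ p + wl ≤ c := by
  obtain ⟨hle, hlt, hge⟩ := bisect_spec ps x hs
  constructor
  · rintro ⟨hne, hcond⟩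
    have hj : bisect_left ps x < ps.length := lt_of_le_of_ne hle hne
    rw [List.getD_eq_getElem ps 0 hj] at hcond
    exact ⟨ps[bisect_left ps x], List.getElem_mem hj, hge _ le_rfl hj, hcond⟩
  · rintro ⟨p, hp, hxp, hpc⟩
    obtain ⟨k, hk, rfl⟩ := List.mem_iff_getElem.mp hp
    have hjk : bisect_left ps x ≤ k := by
      by_contra hcon
      exact absurd hxp (not_le.mpr (hlt k (by omega) hk))
    have hj : bisect_left ps x < ps.length := lt_of_le_of_lt hjk hk
    refine ⟨by omega, ?_⟩
    rw [List.getD_eq_getElem ps 0 hj]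
    have hmono : ps[bisect_left ps x] ≤ ps[k] := by
      rcases Nat.lt_or_ge (bisect_left ps x) k with h | h
      · exact List.pairwise_iff_getElem.mp hs _ _ hj hk h
      · have h2 : bisect_left ps x = k := by omega
        simp [h2]
    omega

lemma word_cond_iff (s w : List Char) (L i : Nat) (h1 : i + L ≤ s.length) :
    (let ps := posList s w
     let j := bisect_left ps (i : Int)
     (!(j == ps.length || decide (ps.getD j 0 + (w.length : Int) > (i : Int) + (L : Int))))) = true
    ↔ w <:+: (s.drop i).take L := by
  simp only [Bool.not_eq_true', Bool.or_eq_false_iff, beq_eq_false_iff_ne, ne_eq,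
    decide_eq_false_iff_not, not_lt]
  exact (bisect_cond_iff (posList s w) (sorted_posList s w) (i : Int) (w.length : Int)
    ((i : Int) + (L : Int))).trans (exists_occ_iff s w L i h1)

lemma checkB_eq_chkP (words : List String) (sentence : String) (L i : Nat)
    (h1 : i + L ≤ sentence.toList.length) :
    checkB (L : Int)
      (words.map (fun w => (((w.toList.length : Nat) : Int), posList sentence.toList w.toList)))
      (i : Int) = chkP words sentence L i := by
  rw [Bool.eq_iff_iff, checkB, List.all_map, List.all_eq_true, chkP_iff]
  constructor
  · intro h w hw
    exact (word_cond_iff sentence.toList w.toList L i h1).mp (h w hw)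
  · intro h w hw
    exact (word_cond_iff sentence.toList w.toList L i h1).mpr (h w hw)

lemma alt_scan (words : List String) (sentence : String)
    (hL : (words.map (fun w => w.toList.length)).sum ≤ sentence.toList.length) :
    find_all_substrings_alt words sentence =
      scanRes words sentence ((words.map (fun w => w.toList.length)).sum)
        (List.range' 0 (sentence.toList.length - (words.map (fun w => w.toList.length)).sum + 1)) := by
  have hsum : (words.map (fun w => ((w.toList.length : Nat) : Int))).sum
      = (((words.map (fun w => w.toList.length)).sum : Nat) : Int) := by
    rw [Nat.cast_list_sum, List.map_map]; rfl
  simp only [find_all_substrings_alt]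
  rw [hsum]
  rw [if_neg (by omega)]
  rw [show (sentence.toList.length : Int) - (((words.map (fun w => w.toList.length)).sum : Nat) : Int) + 1
      = ((sentence.toList.length - (words.map (fun w => w.toList.length)).sum + 1 : Nat) : Int) by omega]
  rw [PySem.List.pyRange_zero_natCast, List.find?_map]
  rw [find?_congr_mem (p := (checkB (((words.map (fun w => w.toList.length)).sum : Nat) : Int)
        (words.map (fun w => (((w.toList.length : Nat) : Int), posList sentence.toList w.toList)))) ∘
        (fun k : Nat => (k : Int)))
      (q := chkP words sentence ((words.map (fun w => w.toList.length)).sum))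
      (List.range (sentence.toList.length - (words.map (fun w => w.toList.length)).sum + 1))
      (by
        intro j hj
        rw [List.mem_range] at hj
        rw [Function.comp_apply]
        exact checkB_eq_chkP words sentence _ j (by omega))]
  rw [List.range_eq_range']
  cases hf : List.find? (chkP words sentence ((words.map (fun w => w.toList.length)).sum))
      (List.range' 0 (sentence.toList.length - (words.map (fun w => w.toList.length)).sum + 1)) with
  | none => simp only [scanRes, hf, Option.map_none]
  | some j => simp only [scanRes, hf, Option.map_some]

lemma a_scan (words : List String) (sentence : String) :
    find_all_substrings words sentence =
      scanRes words sentence ((words.map (fun w => w.toList.length)).sum)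
        (List.range' 0 (sentence.toList.length - (words.map (fun w => w.toList.length)).sum)) := by
  simp only [find_all_substrings]
  rw [join_len]
  rw [loopA_scan words sentence ((words.map (fun w => w.toList.length)).sum)
      sentence.toList.length sentence.toList.length 0 (by omega), Nat.sub_zero]

lemma alt_big (words : List String) (sentence : String)
    (hL : sentence.toList.length < (words.map (fun w => w.toList.length)).sum) :
    find_all_substrings_alt words sentence = (-1, "Not found") := by
  have hsum : (words.map (fun w => ((w.toList.length : Nat) : Int))).sum
      = (((words.map (fun w => w.toList.length)).sum : Nat) : Int) := by
    rw [Nat.cast_list_sum, List.map_map]; rfl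
  simp only [find_all_substrings_alt]
  rw [hsum]
  rw [if_pos (by omega)]

-- ===== VERDICT (by name: the statement is the Claim_ definition above) =====
lemma not_D_no_last (words : List String) (sentence : String)
    (hnd : ¬ D_find_all_substrings words sentence)
    (hLn : (words.map (fun w => w.toList.length)).sum ≤ sentence.toList.length)
    (hf : List.find? (chkP words sentence ((words.map (fun w => w.toList.length)).sum))
      (List.range' 0 (sentence.toList.length - (words.map (fun w => w.toList.length)).sum)) = none) :
    chkP words sentence ((words.map (fun w => w.toList.length)).sum)
      (sentence.toList.length - (words.map (fun w => w.toList.length)).sum) = false := by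
  cases hc : chkP words sentence ((words.map (fun w => w.toList.length)).sum)
      (sentence.toList.length - (words.map (fun w => w.toList.length)).sum) with
  | false => rfl
  | true =>
    exfalso
    apply hnd
    refine ⟨hLn, ?_⟩
    intro i hi
    constructor
    · intro hall
      by_contra hne
      have h2 : chkP words sentence ((words.map (fun w => w.toList.length)).sum) i = false := by
        have := List.find?_eq_none.mp hf i (by rw [List.mem_range'_1]; omega)
        simpa using this
      rw [← Bool.not_eq_true, chkP_iff] at h2
      exact h2 hall
    · intro hieq
      subst hieq
      exact (chkP_iff words sentence _ _).mp hc

theorem find_all_substrings_spec : Claim_unchanged_find_all_substrings := by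
  intro words sentence _hdom hnd
  by_cases hLn : (words.map (fun w => w.toList.length)).sum ≤ sentence.toList.length
  · rw [a_scan, alt_scan words sentence hLn, List.range'_concat]
    simp only [Nat.zero_add, Nat.one_mul]
    simp only [scanRes, List.find?_append]
    cases hf : List.find? (chkP words sentence ((words.map (fun w => w.toList.length)).sum))
        (List.range' 0 (sentence.toList.length - (words.map (fun w => w.toList.length)).sum)) with
    | some j => simp only [Option.some_or]
    | none =>
      simp only [Option.none_or, List.find?_cons, List.find?_nil,
        not_D_no_last words sentence hnd hLn hf]
  · rw [alt_big words sentence (by omega), a_scan,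
      show sentence.toList.length - (words.map (fun w => w.toList.length)).sum = 0 by omega]
    rfl

theorem find_all_substrings_changed : Claim_changed_find_all_substrings := by
  unfold Claim_changed_find_all_substrings; decide

theorem find_all_substrings_tight : Claim_exact_find_all_substrings := by
  intro words sentence _hdom hD
  obtain ⟨h1, hiff⟩ := hD
  have hf : List.find? (chkP words sentence ((words.map (fun w => w.toList.length)).sum))
      (List.range' 0 (sentence.toList.length - (words.map (fun w => w.toList.length)).sum)) = none := by
    rw [List.find?_eq_none]
    intro i hi
    rw [List.mem_range'_1] at hi
    intro hc
    have h4 := (hiff i (by omega)).mp ((chkP_iff words sentence _ i).mp hc)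
    omega
  have hlast : chkP words sentence ((words.map (fun w => w.toList.length)).sum)
      (sentence.toList.length - (words.map (fun w => w.toList.length)).sum) = true := by
    rw [chkP_iff]
    exact (hiff _ le_rfl).mpr rfl
  rw [a_scan, alt_scan words sentence h1, List.range'_concat]
  simp only [Nat.zero_add, Nat.one_mul]
  simp only [scanRes, List.find?_append, hf, Option.none_or, List.find?_cons, hlast]
  intro hcon
  have h5 : (-1 : Int)
      = ((sentence.toList.length - (words.map (fun w => w.toList.length)).sum : Nat) : Int) :=
    congrArg Prod.fst hcon
  omega
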